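-- pv_equiv track=rewrite | github.com/sivanarayanchalla/mahabharata-rag-ai | streamlit_app_cloud.py | organize_character_info
-- ===== SOURCE A (Python) =====
-- from typing import List, Dict
--
-- def organize_character_info(sentences: List[str], character_name: str) -> str:
--     """Organize character information into coherent paragraphs"""
--     # Group sentences by content type
--     background_sentences = []
--     role_sentences = []
--     event_sentences = []
--     relationship_sentences = []
--
--     for sentence in sentences:
--         sentence_lower = sentence.lower()
--
--         if any(word in sentence_lower for word in ['born', 'birth', 'son of', 'daughter of', 'prince', 'princess']):
--             background_sentences.append(sentence)
--         elif any(word in sentence_lower for word in ['wife', 'husband', 'married', 'mother', 'father', 'brother', 'sister']):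
--             relationship_sentences.append(sentence)
--         elif any(word in sentence_lower for word in ['war', 'battle', 'fight', 'killed', 'died', 'event']):
--             event_sentences.append(sentence)
--         else:
--             role_sentences.append(sentence)
--
--     # Build organized response
--     parts = []
--
--     if background_sentences:
--         parts.append("**Background:** " + " ".join(background_sentences[:3]))
--
--     if role_sentences:
--         parts.append("**Role and Significance:** " + " ".join(role_sentences[:4]))
--
--     if relationship_sentences:
--         parts.append("**Relationships:** " + " ".join(relationship_sentences[:3]))
--
--     if event_sentences:
--         parts.append("**Key Events:** " + " ".join(event_sentences[:3]))
--
--     return "\n\n".join(parts)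
-- ===== SOURCE B (Python) =====
-- from typing import List
--
-- _RULES = [
--     ('background', ['born', 'birth', 'son of', 'daughter of', 'prince', 'princess']),
--     ('relationship', ['wife', 'husband', 'married', 'mother', 'father', 'brother', 'sister']),
--     ('event', ['war', 'battle', 'fight', 'killed', 'died', 'event']),
-- ]
--
-- _SPEC = [
--     ('**Background:** ', 'background', 3),
--     ('**Role and Significance:** ', 'role', 4),
--     ('**Relationships:** ', 'relationship', 3),
--     ('**Key Events:** ', 'event', 3),
-- ]
--
-- def _classify(sentence):
--     sl = sentence.lower()
--     for key, words in _RULES: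
--         if any(w in sl for w in words):
--             return key
--     return 'role'
--
-- def organize_character_info(sentences: List[str], character_name: str) -> str:
--     parts = []
--     for label, key, limit in _SPEC:
--         group = [s for s in sentences if _classify(s) == key]
--         if group:
--             parts.append(label + ' '.join(group[:limit]))
--     return '\n\n'.join(parts)
-- ===== Notes on version B (the rewrite author's own statement) =====
-- stated objective: alternative
-- what changed: Replaced the hard-coded four-way if/elif accumulator loop and four copy-pasted output blocks by a data-driven design: an ordered rule table with a classify helper, and an output spec list driven by per-key filtering of the sentences.
import Mathlib
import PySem

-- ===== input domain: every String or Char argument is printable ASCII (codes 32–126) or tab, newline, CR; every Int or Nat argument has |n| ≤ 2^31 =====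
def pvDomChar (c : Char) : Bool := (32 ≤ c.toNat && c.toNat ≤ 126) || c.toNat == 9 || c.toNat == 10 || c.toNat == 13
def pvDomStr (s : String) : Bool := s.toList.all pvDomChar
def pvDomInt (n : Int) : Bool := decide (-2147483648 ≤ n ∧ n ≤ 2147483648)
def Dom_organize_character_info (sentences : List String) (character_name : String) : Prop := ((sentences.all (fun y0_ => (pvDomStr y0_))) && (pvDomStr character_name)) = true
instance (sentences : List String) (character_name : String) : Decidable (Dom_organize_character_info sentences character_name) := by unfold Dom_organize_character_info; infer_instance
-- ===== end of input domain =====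

-- B replaces A's hard-coded if/elif accumulator loop and four copy-pasted output blocks by a
-- data-driven rule table + classify helper and an output-spec list with per-key filtering (alternative decomposition, same cost).


-- ===== PORT A =====
-- one step of A's for-loop over sentences: state = (background, role, event, relationship)
def pvStepA (acc : List String × List String × List String × List String) (sentence : String) :
    List String × List String × List String × List String :=
  let bg := acc.1; let rl := acc.2.1; let ev := acc.2.2.1; let rel := acc.2.2.2
  let sl := PySem.Str.lower sentence
  if (["born", "birth", "son of", "daughter of", "prince", "princess"].any
        (fun w => PySem.Str.isIn w sl)) then
    (bg ++ [sentence], rl, ev, rel)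
  else if (["wife", "husband", "married", "mother", "father", "brother", "sister"].any
        (fun w => PySem.Str.isIn w sl)) then
    (bg, rl, ev, rel ++ [sentence])
  else if (["war", "battle", "fight", "killed", "died", "event"].any
        (fun w => PySem.Str.isIn w sl)) then
    (bg, rl, ev ++ [sentence], rel)
  else
    (bg, rl ++ [sentence], ev, rel)

def organize_character_info (sentences : List String) (character_name : String) : String :=
  let st := sentences.foldl pvStepA ([], [], [], [])
  let bg := st.1; let rl := st.2.1; let ev := st.2.2.1; let rel := st.2.2.2
  let parts : List String := []
  let parts := if !bg.isEmpty then
    parts ++ ["**Background:** " ++ PySem.Str.join " " (PySem.List.slice bg none (some 3))] else parts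
  let parts := if !rl.isEmpty then
    parts ++ ["**Role and Significance:** " ++ PySem.Str.join " " (PySem.List.slice rl none (some 4))] else parts
  let parts := if !rel.isEmpty then
    parts ++ ["**Relationships:** " ++ PySem.Str.join " " (PySem.List.slice rel none (some 3))] else parts
  let parts := if !ev.isEmpty then
    parts ++ ["**Key Events:** " ++ PySem.Str.join " " (PySem.List.slice ev none (some 3))] else parts
  PySem.Str.join "\n\n" parts

-- ===== PORT B =====
def pvRules : List (String × List String) :=
  [("background", ["born", "birth", "son of", "daughter of", "prince", "princess"]),
   ("relationship", ["wife", "husband", "married", "mother", "father", "brother", "sister"]),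
   ("event", ["war", "battle", "fight", "killed", "died", "event"])]

def pvSpec : List (String × String × Int) :=
  [("**Background:** ", "background", 3),
   ("**Role and Significance:** ", "role", 4),
   ("**Relationships:** ", "relationship", 3),
   ("**Key Events:** ", "event", 3)]

def pvClassify (sentence : String) : String :=
  let sl := PySem.Str.lower sentence
  match pvRules.find? (fun r => r.2.any (fun w => PySem.Str.isIn w sl)) with
  | some r => r.1
  | none => "role"

def organize_character_info_alt (sentences : List String) (character_name : String) : String :=
  let parts := pvSpec.foldl (fun (parts : List String) t =>
    let group := sentences.filter (fun s => pvClassify s == t.2.1)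
    if !group.isEmpty then
      parts ++ [t.1 ++ PySem.Str.join " " (PySem.List.slice group none (some t.2.2))]
    else parts) []
  PySem.Str.join "\n\n" parts

-- ===== PRECONDITION & SPEC =====
def Spec_organize_character_info (sentences : List String) (character_name : String) (out : String) : Prop := out = organize_character_info_alt sentences character_name
instance (sentences : List String) (character_name : String) (out : String) : Decidable (Spec_organize_character_info sentences character_name out) := by unfold Spec_organize_character_info; infer_instance

-- ===== CLAIM (what is proved, stated in full; the proofs are below) =====
def Claim_equal_organize_character_info : Prop := ∀ (sentences : List String) (character_name : String), Dom_organize_character_info sentences character_name → Spec_organize_character_info sentences character_name (organize_character_info sentences character_name)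

-- ===== LEMMAS AND PROOFS =====

-- characterization of B's classifier by the three keyword tests A's branches use
lemma pvClassify_bg (s : String)
    (h1 : (["born", "birth", "son of", "daughter of", "prince", "princess"].any
      (fun w => PySem.Str.isIn w (PySem.Str.lower s))) = true) :
    pvClassify s = "background" := by
  simp only [pvClassify, pvRules]
  rw [List.find?_cons_of_pos (by exact h1)]

lemma pvClassify_rel (s : String)
    (h1 : ¬ (["born", "birth", "son of", "daughter of", "prince", "princess"].any
      (fun w => PySem.Str.isIn w (PySem.Str.lower s))) = true)
    (h2 : (["wife", "husband", "married", "mother", "father", "brother", "sister"].any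
      (fun w => PySem.Str.isIn w (PySem.Str.lower s))) = true) :
    pvClassify s = "relationship" := by
  simp only [pvClassify, pvRules]
  rw [List.find?_cons_of_neg (by exact h1), List.find?_cons_of_pos (by exact h2)]

lemma pvClassify_ev (s : String)
    (h1 : ¬ (["born", "birth", "son of", "daughter of", "prince", "princess"].any
      (fun w => PySem.Str.isIn w (PySem.Str.lower s))) = true)
    (h2 : ¬ (["wife", "husband", "married", "mother", "father", "brother", "sister"].any
      (fun w => PySem.Str.isIn w (PySem.Str.lower s))) = true)
    (h3 : (["war", "battle", "fight", "killed", "died", "event"].any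
      (fun w => PySem.Str.isIn w (PySem.Str.lower s))) = true) :
    pvClassify s = "event" := by
  simp only [pvClassify, pvRules]
  rw [List.find?_cons_of_neg (by exact h1), List.find?_cons_of_neg (by exact h2),
      List.find?_cons_of_pos (by exact h3)]

lemma pvClassify_role (s : String)
    (h1 : ¬ (["born", "birth", "son of", "daughter of", "prince", "princess"].any
      (fun w => PySem.Str.isIn w (PySem.Str.lower s))) = true)
    (h2 : ¬ (["wife", "husband", "married", "mother", "father", "brother", "sister"].any
      (fun w => PySem.Str.isIn w (PySem.Str.lower s))) = true)
    (h3 : ¬ (["war", "battle", "fight", "killed", "died", "event"].any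
      (fun w => PySem.Str.isIn w (PySem.Str.lower s))) = true) :
    pvClassify s = "role" := by
  simp only [pvClassify, pvRules]
  rw [List.find?_cons_of_neg (by exact h1), List.find?_cons_of_neg (by exact h2),
      List.find?_cons_of_neg (by exact h3)]
  rfl

-- A's loop leaves, appended to each accumulator, exactly the sentences B's classifier sends to that key.
lemma pvLoopA_eq (sentences : List String) :
    ∀ bg rl ev rel,
      sentences.foldl pvStepA (bg, rl, ev, rel) =
        (bg ++ sentences.filter (fun s => pvClassify s == "background"),
         rl ++ sentences.filter (fun s => pvClassify s == "role"),
         ev ++ sentences.filter (fun s => pvClassify s == "event"),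
         rel ++ sentences.filter (fun s => pvClassify s == "relationship")) := by
  induction sentences with
  | nil => intro bg rl ev rel; simp
  | cons s ss ih =>
    intro bg rl ev rel
    rw [List.foldl_cons]
    by_cases h1 : (["born", "birth", "son of", "daughter of", "prince", "princess"].any
        (fun w => PySem.Str.isIn w (PySem.Str.lower s))) = true
    · rw [show pvStepA (bg, rl, ev, rel) s = (bg ++ [s], rl, ev, rel) from by
        simp only [pvStepA]; rw [if_pos h1]]
      rw [ih]
      simp [pvClassify_bg s h1]
    · by_cases h2 : (["wife", "husband", "married", "mother", "father", "brother", "sister"].any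
          (fun w => PySem.Str.isIn w (PySem.Str.lower s))) = true
      · rw [show pvStepA (bg, rl, ev, rel) s = (bg, rl, ev, rel ++ [s]) from by
          simp only [pvStepA]; rw [if_neg h1, if_pos h2]]
        rw [ih]
        simp [pvClassify_rel s h1 h2]
      · by_cases h3 : (["war", "battle", "fight", "killed", "died", "event"].any
            (fun w => PySem.Str.isIn w (PySem.Str.lower s))) = true
        · rw [show pvStepA (bg, rl, ev, rel) s = (bg, rl, ev ++ [s], rel) from by
            simp only [pvStepA]; rw [if_neg h1, if_neg h2, if_pos h3]]
          rw [ih]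
          simp [pvClassify_ev s h1 h2 h3]
        · rw [show pvStepA (bg, rl, ev, rel) s = (bg, rl ++ [s], ev, rel) from by
            simp only [pvStepA]; rw [if_neg h1, if_neg h2, if_neg h3]]
          rw [ih]
          simp [pvClassify_role s h1 h2 h3]

-- ===== VERDICT (by name: the statement is the Claim_ definition above) =====
theorem organize_character_info_spec : Claim_equal_organize_character_info := by
  intro sentences character_name _
  show _ = _
  unfold organize_character_info organize_character_info_alt
  rw [pvLoopA_eq]
  simp [pvSpec, List.foldl]
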